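-- pv_equiv track=rewrite | github.com/VishnuSwaminathan/primer-designer | entropy/primer_finder_classes.py | _count_degeneracy
-- ===== SOURCE A (Python) =====
-- def _count_degeneracy(seq):
--     deg = 0
--     one_deg = set(['R', 'M', 'W', 'S', 'K', 'Y'])
--     two_deg = set(['V', 'D', 'H', 'B'])
--     three_deg = set(['N'])
--     for char in seq:
--         if char in one_deg:
--             deg += 1
--         elif char in two_deg:
--             deg += 2
--         elif char in three_deg:
--             deg += 3
--     return deg
-- ===== SOURCE B (Python) =====
-- def _count_degeneracy(seq):
--     weights = {'R': 1, 'M': 1, 'W': 1, 'S': 1, 'K': 1, 'Y': 1,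
--                'V': 2, 'D': 2, 'H': 2, 'B': 2, 'N': 3}
--     counts = {}
--     for char in seq:
--         counts[char] = counts.get(char, 0) + 1
--     return sum(w * counts.get(ch, 0) for ch, w in weights.items())
-- ===== Notes on version B (the rewrite author's own statement) =====
-- stated objective: alternative
-- what changed: B builds a frequency table of the sequence in one pass and then aggregates over the fixed 11-entry weight table (weight * count), instead of A's per-character if/elif branch chain against three sets accumulating a running total.
import Mathlib
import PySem

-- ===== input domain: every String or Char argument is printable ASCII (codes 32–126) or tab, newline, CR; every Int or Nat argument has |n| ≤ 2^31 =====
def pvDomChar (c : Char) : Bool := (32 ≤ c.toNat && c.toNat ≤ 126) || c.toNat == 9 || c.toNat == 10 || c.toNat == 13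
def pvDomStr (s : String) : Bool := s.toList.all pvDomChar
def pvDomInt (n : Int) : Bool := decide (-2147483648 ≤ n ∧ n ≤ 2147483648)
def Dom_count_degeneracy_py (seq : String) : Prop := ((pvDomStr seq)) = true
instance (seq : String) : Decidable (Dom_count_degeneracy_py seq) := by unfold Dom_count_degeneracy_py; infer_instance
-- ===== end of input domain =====

-- B replaces A's per-character if/elif chain over three sets by a one-pass frequency
-- dict followed by aggregation over a fixed char→weight table (alternative decomposition).


-- ===== PORT A =====
def count_degeneracy_py (seq : String) : Int :=
  let one_deg : PySem.Set Char := PySem.Set.ofList ['R', 'M', 'W', 'S', 'K', 'Y']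
  let two_deg : PySem.Set Char := PySem.Set.ofList ['V', 'D', 'H', 'B']
  let three_deg : PySem.Set Char := PySem.Set.ofList ['N']
  seq.toList.foldl (fun deg char =>
    if PySem.Set.contains one_deg char then deg + 1
    else if PySem.Set.contains two_deg char then deg + 2
    else if PySem.Set.contains three_deg char then deg + 3
    else deg) 0

-- ===== PORT B =====
-- the fixed weights dict, as its items list (insertion order)
def pvWeights : List (Char × Int) :=
  [('R', 1), ('M', 1), ('W', 1), ('S', 1), ('K', 1), ('Y', 1),
   ('V', 2), ('D', 2), ('H', 2), ('B', 2), ('N', 3)]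

def count_degeneracy_py_alt (seq : String) : Int :=
  let counts : PySem.Dict Char Int :=
    seq.toList.foldl (fun d char => d.insert char (d.getD char 0 + 1)) PySem.Dict.empty
  (pvWeights.map (fun p => p.2 * counts.getD p.1 0)).sum

-- ===== PRECONDITION & SPEC =====
def Spec_count_degeneracy_py (seq : String) (out : Int) : Prop := out = count_degeneracy_py_alt seq
instance (seq : String) (out : Int) : Decidable (Spec_count_degeneracy_py seq out) := by unfold Spec_count_degeneracy_py; infer_instance

-- ===== CLAIM (what is proved, stated in full; the proofs are below) =====
def Claim_equal_count_degeneracy_py : Prop := ∀ (seq : String), Dom_count_degeneracy_py seq → Spec_count_degeneracy_py seq (count_degeneracy_py seq)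

-- ===== LEMMAS AND PROOFS =====

-- B's value as a function of the character list: weight-table sum of per-char counts
def pvBSum (l : List Char) : Int :=
  (pvWeights.map (fun p => p.2 * (l.count p.1 : Int))).sum

theorem pvBSum_nil : pvBSum [] = 0 := by decide

-- peeling one character off the front adds exactly A's branch increment for it
theorem pvBSum_cons (c : Char) (t : List Char) :
    pvBSum (c :: t) = pvBSum t +
      (if PySem.Set.contains (PySem.Set.ofList ['R', 'M', 'W', 'S', 'K', 'Y']) c then 1
       else if PySem.Set.contains (PySem.Set.ofList ['V', 'D', 'H', 'B']) c then 2
       else if PySem.Set.contains (PySem.Set.ofList ['N']) c then 3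
       else 0) := by
  by_cases h : c ∈ (['R', 'M', 'W', 'S', 'K', 'Y', 'V', 'D', 'H', 'B', 'N'] : List Char)
  · fin_cases h <;>
      simp [pvBSum, pvWeights, List.count_cons, PySem.Set.contains, PySem.Set.ofList] <;> ring
  · simp only [List.mem_cons, List.not_mem_nil, or_false, not_or] at h
    obtain ⟨h1, h2, h3, h4, h5, h6, h7, h8, h9, h10, h11⟩ := h
    simp [pvBSum, pvWeights, List.count_cons, PySem.Set.contains, PySem.Set.ofList,
      h1, h2, h3, h4, h5, h6, h7, h8, h9, h10, h11]

-- A's fold from any accumulator equals the accumulator plus B's table sum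
theorem pvFold_eq (l : List Char) : ∀ d : Int,
    l.foldl (fun deg char =>
      if PySem.Set.contains (PySem.Set.ofList ['R', 'M', 'W', 'S', 'K', 'Y']) char then deg + 1
      else if PySem.Set.contains (PySem.Set.ofList ['V', 'D', 'H', 'B']) char then deg + 2
      else if PySem.Set.contains (PySem.Set.ofList ['N']) char then deg + 3
      else deg) d = d + pvBSum l := by
  induction l with
  | nil => intro d; simp [pvBSum_nil]
  | cons c t ih =>
    intro d
    rw [List.foldl_cons, ih, pvBSum_cons]
    split_ifs <;> ring

-- ===== VERDICT (by name: the statement is the Claim_ definition above) =====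
theorem count_degeneracy_py_spec : Claim_equal_count_degeneracy_py := by
  intro seq _
  unfold Spec_count_degeneracy_py count_degeneracy_py count_degeneracy_py_alt
  rw [pvFold_eq, PySem.Dict.foldl_insert_getD_add_one_eq_counter]
  simp only [PySem.Dict.getD_counter]
  simp [pvBSum]
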